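-- pv_equiv track=rewrite | github.com/lukYanovich/BSU | MMF/6-7sem/statistic/lab1.py | get_var_arr
-- ===== SOURCE A (Python) =====
-- def get_var_arr(arr):
--     # случайные величины и сколько раз встречались
--     arr.sort()
--     var_arr_x, var_arr_count = [], []
--     for i in range(len(arr)):
--         if arr[i] in var_arr_x:
--             var_arr_count[var_arr_x.index(arr[i])] += 1
--         else:
--             var_arr_x.append(arr[i])
--             var_arr_count.append(1)
--     return var_arr_x, var_arr_count
-- ===== SOURCE B (Python) =====
-- def get_var_arr(arr):
--     # sort in place (same observable mutation as the original), then
--     # count consecutive equal runs in one pass over the sorted array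
--     arr.sort()
--     var_arr_x, var_arr_count = [], []
--     i, n = 0, len(arr)
--     while i < n:
--         j = i
--         while j < n and arr[j] == arr[i]:
--             j += 1
--         var_arr_x.append(arr[i])
--         var_arr_count.append(j - i)
--         i = j
--     return var_arr_x, var_arr_count
-- ===== Notes on version B (the rewrite author's own statement) =====
-- stated objective: faster
-- what changed: replaces the per-element membership test and list.index scan over the uniques with a single run-length pass over the sorted array
import Mathlib
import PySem

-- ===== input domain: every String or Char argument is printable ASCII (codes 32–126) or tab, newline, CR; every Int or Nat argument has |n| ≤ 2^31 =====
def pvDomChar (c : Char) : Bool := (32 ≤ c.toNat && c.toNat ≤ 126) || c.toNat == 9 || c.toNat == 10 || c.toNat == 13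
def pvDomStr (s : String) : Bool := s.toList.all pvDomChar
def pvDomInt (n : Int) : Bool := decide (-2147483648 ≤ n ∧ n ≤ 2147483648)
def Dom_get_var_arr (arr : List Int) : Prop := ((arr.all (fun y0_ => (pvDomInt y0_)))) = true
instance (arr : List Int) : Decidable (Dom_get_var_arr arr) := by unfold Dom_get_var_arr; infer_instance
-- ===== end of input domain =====

-- B replaces A's per-element membership/index scan with one run-length pass over the
-- sorted array (faster). Both Pythons sort `arr` in place; the equivalence proved here
-- is about the return value (the mutation is identical in A and B anyway).

-- ===== PORT A =====
-- the for-loop over the sorted array: state = (var_arr_x, var_arr_count)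
def pvALoop : List Int → List Int → List Int → List Int × List Int
  | [], xs, cs => (xs, cs)
  | a :: rest, xs, cs =>
    if xs.contains a then
      match PySem.List.index? xs a with
      | some i => pvALoop rest xs (cs.set i (cs.getD i 0 + 1))
      | none => pvALoop rest xs cs   -- unreachable: guarded by the membership test
    else
      pvALoop rest (xs ++ [a]) (cs ++ [1])

def get_var_arr (arr : List Int) : List Int × List Int :=
  pvALoop (PySem.List.sorted arr (fun x => x) false) [] []

-- ===== PORT B =====
-- the outer while-loop: take the run of elements equal to the head, record its length
def pvBRuns : List Int → List Int × List Int
  | [] => ([], [])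
  | x :: rest =>
    let run := rest.takeWhile (fun y => y == x)
    let rest' := rest.dropWhile (fun y => y == x)
    let p := pvBRuns rest'
    (x :: p.1, ((run.length : Int) + 1) :: p.2)
  termination_by l => l.length
  decreasing_by
    simpa using Nat.lt_succ_of_le (List.length_dropWhile_le _ _)

def get_var_arr_alt (arr : List Int) : List Int × List Int :=
  pvBRuns (PySem.List.sorted arr (fun x => x) false)

-- ===== PRECONDITION & SPEC =====
def Spec_get_var_arr (arr : List Int) (out : List Int × List Int) : Prop := out = get_var_arr_alt arr
instance (arr : List Int) (out : List Int × List Int) : Decidable (Spec_get_var_arr arr out) := by unfold Spec_get_var_arr; infer_instance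

-- ===== CLAIM (what is proved, stated in full; the proofs are below) =====
def Claim_equal_get_var_arr : Prop := ∀ (arr : List Int), Dom_get_var_arr arr → Spec_get_var_arr arr (get_var_arr arr)

-- ===== LEMMAS AND PROOFS =====

theorem pv_concat_getD_last (cs : List Int) (c : Int) : (cs ++ [c]).getD cs.length 0 = c := by
  induction cs with
  | nil => simp
  | cons h t ih => simpa using ih

theorem pv_concat_set_last (cs : List Int) (c v : Int) : (cs ++ [c]).set cs.length v = cs ++ [v] := by
  induction cs with
  | nil => simp
  | cons h t ih => simpa using ih

-- absorbing a run of k copies of x into the last counter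
theorem pv_run_lemma (k : Nat) (x : Int) :
    ∀ (rest xs cs : List Int) (c : Int), x ∉ xs → cs.length = xs.length →
      pvALoop (List.replicate k x ++ rest) (xs ++ [x]) (cs ++ [c]) =
      pvALoop rest (xs ++ [x]) (cs ++ [c + k]) := by
  induction k with
  | zero => intro rest xs cs c _ _; simp
  | succ n ih =>
    intro rest xs cs c hx hlen
    have hmem : (xs ++ [x]).contains x := by simp
    have hidx : PySem.List.index? (xs ++ [x]) x = some xs.length :=
      PySem.List.index?_append_singleton_self xs x hx
    have hset : ((cs ++ [c]).set xs.length ((cs ++ [c]).getD xs.length 0 + 1)) = cs ++ [c + 1] := by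
      rw [← hlen, pv_concat_getD_last, pv_concat_set_last]
    calc pvALoop (List.replicate (n+1) x ++ rest) (xs ++ [x]) (cs ++ [c])
        = pvALoop (List.replicate n x ++ rest) (xs ++ [x]) (cs ++ [c + 1]) := by
          simp only [List.replicate_succ, List.cons_append, pvALoop, hmem, if_true, hidx, hset]
      _ = pvALoop rest (xs ++ [x]) (cs ++ [c + 1 + n]) := ih rest xs cs (c + 1) hx hlen
      _ = pvALoop rest (xs ++ [x]) (cs ++ [c + (n + 1 : Nat)]) := by
          have h : c + 1 + (n : Int) = c + ((n + 1 : Nat) : Int) := by push_cast; ring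
          rw [h]

theorem pv_dropWhile_gt (x : Int) (rest : List Int) (hs : rest.Pairwise (· ≤ ·))
    (hge : ∀ a ∈ rest, x ≤ a) :
    ∀ a ∈ rest.dropWhile (fun y => y == x), x < a := by
  induction rest with
  | nil => simp
  | cons r rs ih =>
    by_cases h : r = x
    · subst h
      simp only [List.dropWhile_cons, beq_self_eq_true, if_true]
      exact ih (List.Pairwise.sublist (List.sublist_cons_self r rs) hs)
        (fun a ha => hge a (List.mem_cons_of_mem r ha))
    · have hdw : (r :: rs).dropWhile (fun y => y == x) = r :: rs := by
        simp [h]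
      rw [hdw]
      intro a ha
      have hxr : x < r := lt_of_le_of_ne (hge r (List.mem_cons_self)) (fun e => h e.symm)
      rcases List.mem_cons.mp ha with rfl | ha'
      · exact hxr
      · exact lt_of_lt_of_le hxr ((List.pairwise_cons.mp hs).1 a ha')

theorem pv_takeWhile_replicate (x : Int) (rest : List Int) :
    rest.takeWhile (fun y => y == x) = List.replicate (rest.takeWhile (fun y => y == x)).length x := by
  apply List.eq_replicate_of_mem
  intro a ha
  have := List.mem_takeWhile_imp ha
  exact eq_of_beq (by simpa using this)

theorem pv_main : ∀ (n : Nat) (s xs cs : List Int), s.length ≤ n →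
    s.Pairwise (· ≤ ·) → (∀ a ∈ s, ∀ b ∈ xs, b < a) → cs.length = xs.length →
    pvALoop s xs cs = (xs ++ (pvBRuns s).1, cs ++ (pvBRuns s).2) := by
  intro n
  induction n with
  | zero =>
    intro s xs cs hn _ _ _
    have : s = [] := List.length_eq_zero_iff.mp (Nat.le_zero.mp hn)
    subst this; rw [pvALoop, pvBRuns]; simp
  | succ m ih =>
    intro s xs cs hn hs hgt hlen
    match s with
    | [] => rw [pvALoop, pvBRuns]; simp
    | x :: rest =>
      have hxnot : ¬ xs.contains x := by
        simp only [List.contains_eq_mem, decide_eq_true_eq]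
        intro hm
        exact lt_irrefl x (hgt x (List.mem_cons_self) x hm)
      have hxnotmem : x ∉ xs := by simpa using hxnot
      have step1 : pvALoop (x :: rest) xs cs = pvALoop rest (xs ++ [x]) (cs ++ [1]) := by
        simp only [pvALoop]; rw [if_neg hxnot]
      set run := rest.takeWhile (fun y => y == x) with hrun
      set rest' := rest.dropWhile (fun y => y == x) with hrest'
      have hsplit : rest = run ++ rest' := (List.takeWhile_append_dropWhile).symm
      have hrep : run = List.replicate run.length x := pv_takeWhile_replicate x rest
      have hlen1 : (cs ++ [1]).length = (xs ++ [x]).length := by simp [hlen]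
      have hrestpair : rest.Pairwise (· ≤ ·) := (List.pairwise_cons.mp hs).2
      have hge : ∀ a ∈ rest, x ≤ a := (List.pairwise_cons.mp hs).1
      have hstep2 : pvALoop rest (xs ++ [x]) (cs ++ [1]) =
          pvALoop rest' (xs ++ [x]) (cs ++ [1 + (run.length : Int)]) := by
        conv_lhs => rw [hsplit, hrep]
        exact pv_run_lemma run.length x rest' xs cs 1 hxnotmem hlen
      have hgt' : ∀ a ∈ rest', ∀ b ∈ xs ++ [x], b < a := by
        intro a ha b hb
        have hxa : x < a := pv_dropWhile_gt x rest hrestpair hge a ha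
        rcases List.mem_append.mp hb with hb' | hb'
        · exact lt_trans (hgt x (List.mem_cons_self) b hb') hxa
        · rw [List.mem_singleton.mp hb']; exact hxa
      have hrestpair' : rest'.Pairwise (· ≤ ·) :=
        List.Pairwise.sublist (List.dropWhile_sublist _) hrestpair
      have hlen' : rest'.length ≤ m := by
        have h1 : rest'.length ≤ rest.length := List.length_dropWhile_le _ _
        have h2 : rest.length + 1 ≤ m + 1 := by simpa using hn
        omega
      have hih := ih rest' (xs ++ [x]) (cs ++ [1 + (run.length : Int)]) hlen' hrestpair' hgt' (by simp [hlen])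
      have hb : pvBRuns (x :: rest) = (x :: (pvBRuns rest').1, ((run.length : Int) + 1) :: (pvBRuns rest').2) := by
        rw [pvBRuns]
      rw [step1, hstep2, hih, hb]
      simp [add_comm]

-- ===== VERDICT (by name: the statement is the Claim_ definition above) =====
theorem get_var_arr_spec : Claim_equal_get_var_arr := by
  intro arr _
  unfold Spec_get_var_arr get_var_arr get_var_arr_alt
  set s := PySem.List.sorted arr (fun x => x) false with hsdef
  have hpair : s.Pairwise (· ≤ ·) := by
    simpa using PySem.List.sorted_pairwise arr (fun x => x)
  have := pv_main s.length s [] [] (le_refl _) hpair (by simp) rfl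
  simpa using this
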